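-- pv_equiv track=rewrite | github.com/ai-kmu/etc | algorithm/2020/0713/hyejin.py | mergeMax
-- ===== SOURCE A (Python) =====
-- def mergeMax(nums1, nums2):
--     merge_arr = []
--     while nums1 or nums2:
--         if nums1 > nums2:
--             merge_arr.append(nums1[0])
--             nums1 = nums1[1:]
--         else:
--             merge_arr.append(nums2[0])
--             nums2 = nums2[1:]
--     return merge_arr
-- ===== SOURCE B (Python) =====
-- def mergeMax(nums1, nums2):
--     # Dynamic programming: row[j] == (nums1[i:] > nums2[j:]) for the current i,
--     # computed bottom-up from the recurrence
--     #   nums1[i:] > nums2[j:]  <=>  nums1[i] > nums2[j]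
--     #                               or (nums1[i] == nums2[j] and nums1[i+1:] > nums2[j+1:]),
--     # with nums1[i:] > nums2[m:] true for i < n and [] > anything false.
--     # The merge then just walks two indices and reads the table.
--     n, m = len(nums1), len(nums2)
--     row = [False] * (m + 1)                 # i == n: the empty suffix is never greater
--     rows = [row]
--     for x in reversed(nums1):
--         row = [x > y or (x == y and p) for y, p in zip(nums2, row[1:])] + [True]
--         rows.append(row)
--     rows.reverse()                          # rows[i][j] == (nums1[i:] > nums2[j:])
--     out = []
--     i = j = 0
--     while i < n or j < m:
--         if j >= m or (i < n and rows[i][j]):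
--             out.append(nums1[i]); i += 1
--         else:
--             out.append(nums2[j]); j += 1
--     return out
-- ===== Notes on version B (the rewrite author's own statement) =====
-- stated objective: alternative
-- what changed: B uses dynamic programming: it precomputes the whole table rows[i][j] = (nums1[i:] > nums2[j:]) bottom-up from the one-step recurrence, then merges with two index pointers that only read the table, instead of A's re-slicing both lists and re-running a full lexicographic list comparison at every step.
import Mathlib
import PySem

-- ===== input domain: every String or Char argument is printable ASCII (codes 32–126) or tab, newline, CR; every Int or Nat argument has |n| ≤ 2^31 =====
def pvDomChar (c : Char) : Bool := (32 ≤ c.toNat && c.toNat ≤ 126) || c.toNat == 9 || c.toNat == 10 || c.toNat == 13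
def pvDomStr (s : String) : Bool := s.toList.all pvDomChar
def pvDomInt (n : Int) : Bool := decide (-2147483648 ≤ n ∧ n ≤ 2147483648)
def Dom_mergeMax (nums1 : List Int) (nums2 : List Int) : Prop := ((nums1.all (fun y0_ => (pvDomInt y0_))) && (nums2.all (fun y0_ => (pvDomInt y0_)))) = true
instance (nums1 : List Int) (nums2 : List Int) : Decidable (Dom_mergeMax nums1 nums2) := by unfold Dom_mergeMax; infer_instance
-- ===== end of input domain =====

-- B replaces A's per-step suffix slicing and list re-comparison by dynamic programming:
-- it precomputes the table rows[i][j] = (nums1[i:] > nums2[j:]) bottom-up and the merge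
-- loop only walks two indices and reads the table (objective: alternative algorithm).


-- Python's '>' on int lists: lexicographic, a proper prefix is smaller (used by port A).
def pyGtI : List Int → List Int → Bool
  | _ :: _, [] => true
  | [], _ => false
  | a :: as, b :: bs => a > b || (a == b && pyGtI as bs)

-- ===== PORT A =====
-- the while loop of A: accumulator `merge_arr`, append = acc ++ [·], nums[1:] = tail
def mergeMaxGoA (n1 n2 acc : List Int) : List Int :=
  if n1 = [] ∧ n2 = [] then acc
  else if pyGtI n1 n2 then mergeMaxGoA n1.tail n2 (acc ++ [n1.headI])
  else mergeMaxGoA n1 n2.tail (acc ++ [n2.headI])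
termination_by n1.length + n2.length
decreasing_by
  · cases n1 with
    | nil => simp [pyGtI] at *
    | cons a as => simp
  · cases n2 with
    | nil =>
      cases n1 with
      | nil => simp at *
      | cons a as => simp [pyGtI] at *
    | cons b bs => simp

def mergeMax (nums1 : List Int) (nums2 : List Int) : List Int :=
  mergeMaxGoA nums1 nums2 []

-- ===== PORT B =====
-- one DP step of Source B: row = [x > y or (x == y and p) for y, p in zip(nums2, row[1:])] + [True]
def rowStep (b : List Int) (x : Int) (prev : List Bool) : List Bool :=
  (List.zipWith (fun y p => decide (x > y) || (x == y && p)) b prev.tail) ++ [true]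

-- the body of Source B's `for x in reversed(nums1)` loop: build the next row, append it
def dpStep (b : List Int) (st : List Bool × List (List Bool)) (x : Int) : List Bool × List (List Bool) :=
  let row := rowStep b x st.1
  (row, st.2 ++ [row])

-- the merge loop of Source B: two index pointers, each step reads the precomputed table
-- (rows[i][j] is only read with 0 ≤ i < n, 0 ≤ j < m, always in range: getD is exact here)
def mergeMaxGoB (a b : List Int) (rows : List (List Bool)) (i j : Nat) (out : List Int) : List Int :=
  if i < a.length ∨ j < b.length then
    if b.length ≤ j ∨ (i < a.length ∧ (rows.getD i []).getD j false) then
      mergeMaxGoB a b rows (i + 1) j (out ++ [a.getD i 0])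
    else mergeMaxGoB a b rows i (j + 1) (out ++ [b.getD j 0])
  else out
termination_by (a.length - i) + (b.length - j)
decreasing_by
  · omega
  · omega

-- for x in reversed(nums1): row = rowStep …; rows.append(row); then rows.reverse()
def mergeMax_alt (nums1 : List Int) (nums2 : List Int) : List Int :=
  mergeMaxGoB nums1 nums2
    ((nums1.reverse.foldl (dpStep nums2)
        (List.replicate (nums2.length + 1) false,
         [List.replicate (nums2.length + 1) false])).2.reverse)
    0 0 []

-- ===== PRECONDITION & SPEC =====
def Spec_mergeMax (nums1 : List Int) (nums2 : List Int) (out : List Int) : Prop := out = mergeMax_alt nums1 nums2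
instance (nums1 : List Int) (nums2 : List Int) (out : List Int) : Decidable (Spec_mergeMax nums1 nums2 out) := by unfold Spec_mergeMax; infer_instance

-- ===== CLAIM (what is proved, stated in full; the proofs are below) =====
def Claim_equal_mergeMax : Prop := ∀ (nums1 : List Int) (nums2 : List Int), Dom_mergeMax nums1 nums2 → Spec_mergeMax nums1 nums2 (mergeMax nums1 nums2)

-- ===== LEMMAS AND PROOFS =====
theorem pyGt_true_ne_nil {x y : List Int} (h : pyGtI x y = true) : x ≠ [] := by
  cases x <;> simp [pyGtI] at *

-- the intended content of a DP row for suffix s: entry j is (s > b.drop j), j = 0..m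
def rowSpec (b : List Int) (s : List Int) : List Bool :=
  b.tails.map (fun t => pyGtI s t)

theorem rowSpec_nil (b : List Int) : rowSpec b [] = List.replicate (b.length + 1) false := by
  induction b with
  | nil => rfl
  | cons y ys ih =>
      simp only [rowSpec, List.tails_cons, List.map_cons] at *
      simp [pyGtI, List.replicate_succ]

theorem rowStep_spec (b : List Int) (x : Int) (s : List Int) :
    rowStep b x (rowSpec b s) = rowSpec b (x :: s) := by
  induction b with
  | nil => simp [rowStep, rowSpec, pyGtI]
  | cons y ys ih =>
      simp only [rowSpec, List.tails_cons, List.map_cons, rowStep, List.tail_cons] at *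
      have hhead : ys.tails.map (fun t => pyGtI s t) =
          pyGtI s ys :: (ys.tails.tail.map (fun t => pyGtI s t)) := by
        cases ys <;> simp
      rw [hhead]
      simp only [List.zipWith_cons_cons, List.cons_append, List.cons.injEq]
      refine ⟨by simp [pyGtI], ?_⟩
      have := ih
      rw [hhead] at this
      simpa [rowStep] using this

-- the fold over reversed nums1 builds exactly [rowSpec (a.drop n), …, rowSpec (a.drop 0)]
theorem fold_rows (b : List Int) (a : List Int) :
    (a.reverse.foldl (dpStep b)
      (List.replicate (b.length + 1) false, [List.replicate (b.length + 1) false])) =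
    (rowSpec b a, (a.tails.reverse).map (rowSpec b)) := by
  induction a with
  | nil => simp [rowSpec_nil]
  | cons x as ih =>
      have hrev : (x :: as).reverse = as.reverse ++ [x] := by simp
      rw [hrev, List.foldl_append, ih]
      simp [dpStep, rowStep_spec]

theorem rowSpec_getD (b s : List Int) (j : Nat) (h : j ≤ b.length) :
    (rowSpec b s).getD j false = pyGtI s (b.drop j) := by
  induction b generalizing j with
  | nil =>
      have : j = 0 := by simpa using h
      subst this; rfl
  | cons y ys ih =>
      cases j with
      | zero => rfl
      | succ k =>
          simp only [rowSpec, List.tails_cons, List.map_cons, List.getD,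
            List.getElem?_cons_succ, List.drop_succ_cons]
          exact ih k (by simpa using h)

theorem rows_getD (a b : List Int) (i : Nat) (h : i ≤ a.length) :
    ((a.tails).map (rowSpec b)).getD i [] = rowSpec b (a.drop i) := by
  induction a generalizing i with
  | nil =>
      have : i = 0 := by simpa using h
      subst this; rfl
  | cons x xs ih =>
      cases i with
      | zero => rfl
      | succ k =>
          simp only [List.tails_cons, List.map_cons, List.getD,
            List.getElem?_cons_succ, List.drop_succ_cons]
          exact ih k (by simpa using h)

theorem headI_drop {a : List Int} {i : Nat} (hi : i < a.length) :
    (a.drop i).headI = a.getD i 0 := by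
  rw [List.drop_eq_getElem_cons hi, List.getD_eq_getElem a 0 hi]
  rfl

theorem goB_eq_goA (a b : List Int) (i j : Nat) (acc : List Int) :
    mergeMaxGoB a b ((a.tails).map (rowSpec b)) i j acc =
      mergeMaxGoA (a.drop i) (b.drop j) acc := by
  fun_induction mergeMaxGoB a b ((a.tails).map (rowSpec b)) i j acc with
  | case1 i j acc h hc ih =>
      have hgt : pyGtI (a.drop i) (b.drop j) = true := by
        rcases hc with hj | ⟨hi, htab⟩
        · have hi : i < a.length := by omega
          have : b.drop j = [] := List.drop_eq_nil_of_le hj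
          rw [this]
          rcases List.exists_cons_of_ne_nil
              (show a.drop i ≠ [] by simp [List.drop_eq_nil_iff]; omega) with ⟨c, t, hct⟩
          rw [hct]; rfl
        · rw [rows_getD a b i (by omega)] at htab
          rw [rowSpec_getD b (a.drop i) j] at htab
          · exact htab
          · by_contra hjm
            rw [List.getD_eq_default] at htab
            · simp at htab
            · simp [rowSpec, List.length_tails]; omega
      have hi : i < a.length := by
        have := pyGt_true_ne_nil hgt
        by_contra hc2
        exact this (List.drop_eq_nil_of_le (by omega))
      rw [mergeMaxGoA, if_neg (by simp [List.drop_eq_nil_iff]; omega), if_pos hgt,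
          List.tail_drop, headI_drop hi]
      exact ih
  | case2 i j acc h hc ih =>
      push Not at hc
      have hj : j < b.length := by omega
      have hgt : pyGtI (a.drop i) (b.drop j) = false := by
        by_cases hi : i < a.length
        · have htab := hc.2 hi
          rw [rows_getD a b i (by omega), rowSpec_getD b (a.drop i) j (by omega)] at htab
          simpa using htab
        · rw [List.drop_eq_nil_of_le (by omega)]
          rcases List.exists_cons_of_ne_nil
              (show b.drop j ≠ [] by simp [List.drop_eq_nil_iff]; omega) with ⟨c, t, hct⟩
          rw [hct]; rfl
      rw [mergeMaxGoA, if_neg (by simp [List.drop_eq_nil_iff]; omega), if_neg (by simp [hgt]),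
          List.tail_drop, headI_drop hj]
      exact ih
  | case3 i j acc h =>
      push Not at h
      rw [mergeMaxGoA, if_pos]
      constructor <;> exact List.drop_eq_nil_of_le (by omega)

-- ===== VERDICT (by name: the statement is the Claim_ definition above) =====
theorem mergeMax_spec : Claim_equal_mergeMax := by
  intro n1 n2 _
  unfold Spec_mergeMax mergeMax mergeMax_alt
  rw [fold_rows n2 n1]
  simp only [List.map_reverse, List.reverse_reverse]
  rw [goB_eq_goA n1 n2 0 0 []]
  simp
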